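-- pv_equiv track=rewrite | github.com/hmc-cs-mkongsivert/Team-Harrypottercar | generate_sk.py | get_nearest_squares
-- ===== SOURCE A (Python) =====
-- def get_nearest_squares(cities):
--     squares = {} # key = city name, value = nearest square area
--
--     for city in cities:
--         area = city[2]
--         name = city[0]
--         last = 0
--         this = 0
--
--         for i in range(2500):
--             square = i*i
--             last = this
--             this = i
--
--             if square > area:
--                 break
--
--         if area - last > this - area:
--             squares[name] = this
--         else:
--             squares[name] = last
--
--     return squares
-- ===== SOURCE B (Python) =====
-- def get_nearest_squares(cities):
--     squares = {}
--     for city in cities: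
--         name, area = city[0], city[2]
--         # binary search: smallest i in [0, 2499] with i*i > area (2499 if none)
--         lo, hi = 0, 2499
--         while lo < hi:
--             mid = (lo + hi) // 2
--             if mid * mid > area:
--                 hi = mid
--             else:
--                 lo = mid + 1
--         this = lo
--         last = this - 1 if this > 0 else 0
--         squares[name] = this if area - last > this - area else last
--     return squares
-- ===== Notes on version B (the rewrite author's own statement) =====
-- stated objective: faster
-- what changed: Replaces A's linear scan over range(2500) for the smallest i with i*i > area by a binary search over [0, 2499]; the final nearest-side comparison on raw integers is kept identical.
import Mathlib
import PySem

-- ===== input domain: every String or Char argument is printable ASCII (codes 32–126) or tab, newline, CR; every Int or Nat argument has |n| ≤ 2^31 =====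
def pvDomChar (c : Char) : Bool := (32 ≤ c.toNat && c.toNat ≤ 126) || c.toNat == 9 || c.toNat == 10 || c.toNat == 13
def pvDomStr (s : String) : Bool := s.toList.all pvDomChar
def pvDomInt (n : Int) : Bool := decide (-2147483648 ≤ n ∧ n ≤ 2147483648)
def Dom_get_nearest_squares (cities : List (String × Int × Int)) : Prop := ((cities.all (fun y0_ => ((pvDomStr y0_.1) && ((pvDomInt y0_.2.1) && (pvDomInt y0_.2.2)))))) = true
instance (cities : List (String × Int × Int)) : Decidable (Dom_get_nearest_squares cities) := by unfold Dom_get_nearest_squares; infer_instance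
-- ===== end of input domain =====

-- B replaces A's linear scan for the smallest i with i*i > area (up to 2500 iterations
-- per city) by a binary search over [0, 2499]; same final nearest-side comparison.

-- ===== PORT A =====
-- A's inner 'for i in range(2500): square=i*i; last=this; this=i; if square>area: break',
-- ported with the loop counter i and remaining fuel (i + fuel = 2500); returns (last, this).
def pvLoopA (area : Int) : Nat → Nat → Int × Int → Int × Int
  | _, 0, s => s
  | i, fuel + 1, (_, this) =>
    let last' := this
    let this' : Int := (i : Int)
    if (i : Int) * (i : Int) > area then (last', this')
    else pvLoopA area (i + 1) fuel (last', this')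

def get_nearest_squares (cities : List (String × Int × Int)) : List (String × Int) :=
  (cities.foldl (fun squares city =>
    let area := city.2.2
    let name := city.1
    let (last, this) := pvLoopA area 0 2500 (0, 0)
    if area - last > this - area then squares.insert name this
    else squares.insert name last) (PySem.Dict.empty : PySem.Dict String Int)).items

-- ===== PORT B =====
-- Source B's while-loop binary search: smallest i in [0,2499] with i*i > area (2499 if none).
-- fuel ≥ hi - lo makes the while-loop structural; 2499 suffices for the call below.
def pvBsearchB (area : Int) : Nat → Nat → Nat → Nat
  | 0, lo, _ => lo
  | fuel + 1, lo, hi =>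
    if lo < hi then
      let mid := (lo + hi) / 2
      if (mid : Int) * (mid : Int) > area then pvBsearchB area fuel lo mid
      else pvBsearchB area fuel (mid + 1) hi
    else lo

def get_nearest_squares_alt (cities : List (String × Int × Int)) : List (String × Int) :=
  (cities.foldl (fun squares city =>
    let name := city.1
    let area := city.2.2
    let this : Int := (pvBsearchB area 2499 0 2499 : Int)
    let last : Int := if this > 0 then this - 1 else 0
    squares.insert name (if area - last > this - area then this else last))
    (PySem.Dict.empty : PySem.Dict String Int)).items

-- ===== PRECONDITION & SPEC =====
def Spec_get_nearest_squares (cities : List (String × Int × Int)) (out : List (String × Int)) : Prop := out = get_nearest_squares_alt cities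
instance (cities : List (String × Int × Int)) (out : List (String × Int)) : Decidable (Spec_get_nearest_squares cities out) := by unfold Spec_get_nearest_squares; infer_instance

-- ===== CLAIM (what is proved, stated in full; the proofs are below) =====
def Claim_equal_get_nearest_squares : Prop := ∀ (cities : List (String × Int × Int)), Dom_get_nearest_squares cities → Spec_get_nearest_squares cities (get_nearest_squares cities)

-- ===== LEMMAS AND PROOFS =====

-- The common characterisation: the smallest i in [0,2499] with i*i > area, capped at 2499.
def pvT (area : Int) : Nat :=
  if area < 0 then 0 else min (Nat.sqrt area.toNat + 1) 2499

lemma pvT_of_break (area : Int) (i : Nat) (hi : i ≤ 2499)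
    (hno : ∀ j : Nat, j < i → (j : Int) * (j : Int) ≤ area)
    (hbr : (i : Int) * (i : Int) > area) : pvT area = i := by
  unfold pvT
  by_cases hneg : area < 0
  · simp only [hneg, if_true]
    rcases Nat.eq_zero_or_pos i with h0 | h0
    · omega
    · have := hno 0 h0; simp at this; omega
  · simp only [hneg, if_false]
    push_neg at hneg
    have h1 : 1 ≤ i := by
      by_contra h
      have : i = 0 := by omega
      subst this; simp at hbr; omega
    have hlow : ((i - 1 : Nat) : Int) * ((i - 1 : Nat) : Int) ≤ area := hno (i - 1) (by omega)
    have hsq1 : Nat.sqrt area.toNat < i := by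
      rw [Nat.sqrt_lt']
      have : area.toNat < (i * i : Nat) := by
        have : area < (i : Int) * (i : Int) := hbr
        omega
      calc area.toNat < i * i := this
        _ = i ^ 2 := by ring
    have hsq2 : i - 1 ≤ Nat.sqrt area.toNat := by
      rw [Nat.le_sqrt', pow_two]
      have hc : (((i - 1) * (i - 1) : Nat) : Int) ≤ area := by push_cast; push_cast at hlow; omega
      omega
    omega

lemma pvT_of_cap (area : Int)
    (hno : ∀ j : Nat, j < 2500 → (j : Int) * (j : Int) ≤ area) : pvT area = 2499 := by
  unfold pvT
  have h0 := hno 0 (by norm_num)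
  have hneg : ¬ area < 0 := by simp at h0; omega
  simp only [hneg, if_false]
  have hlast := hno 2499 (by norm_num)
  have hsq : 2499 ≤ Nat.sqrt area.toNat := by
    rw [Nat.le_sqrt', pow_two]
    have : ((2499 * 2499 : Nat) : Int) ≤ area := by push_cast; push_cast at hlast; omega
    omega
  omega

-- last, as both programs compute it, from pvT.
def pvL (area : Int) : Int := ((pvT area - 1 : Nat) : Int)

-- A's inner loop computes (pvL, pvT).
lemma pvLoopA_run (area : Int) : ∀ (fuel i : Nat), i + fuel = 2500 →
    (∀ j : Nat, j < i → (j : Int) * (j : Int) ≤ area) →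
    pvLoopA area i fuel (((i - 2 : Nat) : Int), ((i - 1 : Nat) : Int))
      = (pvL area, ((pvT area : Nat) : Int)) := by
  intro fuel
  induction fuel with
  | zero =>
    intro i hif hno
    have hi : i = 2500 := by omega
    subst hi
    have hT := pvT_of_cap area hno
    simp [pvLoopA, pvL, hT]
  | succ n ih =>
    intro i hif hno
    show pvLoopA area i (n + 1) _ = _
    rw [pvLoopA]
    by_cases hbr : (i : Int) * (i : Int) > area
    · have hT := pvT_of_break area i (by omega) hno hbr
      simp only [hbr, if_true]
      have h1 : ((i - 1 : Nat) : Int) = pvL area := by unfold pvL; rw [hT]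
      have h2 : (i : Int) = ((pvT area : Nat) : Int) := by rw [hT]
      simp [h1, h2]
    · simp only [hbr, if_false]
      have hrec := ih (i + 1) (by omega) (by
        intro j hj
        rcases Nat.lt_or_ge j i with h | h
        · exact hno j h
        · have : j = i := by omega
          subst this; omega)
      have e1 : ((i + 1 : Nat) - 2 : Nat) = i - 1 := by omega
      have e2 : ((i + 1 : Nat) - 1 : Nat) = i := by omega
      rw [e1, e2] at hrec
      simpa using hrec

-- At lo = hi the binary-search invariant pins down pvT.
lemma pvB_base (area : Int) (lo : Nat) (hcap : lo ≤ 2499)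
    (hno : ∀ j : Nat, j < lo → (j : Int) * (j : Int) ≤ area)
    (hhi : lo = 2499 ∨ (lo : Int) * (lo : Int) > area) : lo = pvT area := by
  rcases hhi with h | h
  · subst h
    by_cases hbr : (2499 : Int) * 2499 > area
    · exact (pvT_of_break area 2499 le_rfl hno (by exact_mod_cast hbr)).symm
    · refine (pvT_of_cap area ?_).symm
      intro j hj
      rcases Nat.lt_or_ge j 2499 with hj' | hj'
      · exact hno j hj'
      · have : j = 2499 := by omega
        subst this; push_neg at hbr; exact_mod_cast hbr
  · exact (pvT_of_break area lo hcap hno h).symm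

-- B's binary search computes pvT.
lemma pvBsearchB_run (area : Int) : ∀ (n lo hi : Nat), hi - lo ≤ n → lo ≤ hi → hi ≤ 2499 →
    (∀ j : Nat, j < lo → (j : Int) * (j : Int) ≤ area) →
    (hi = 2499 ∨ (hi : Int) * (hi : Int) > area) →
    pvBsearchB area n lo hi = pvT area := by
  intro n
  induction n with
  | zero =>
    intro lo hi hn hlh hcap hno hhi
    have heq : lo = hi := by omega
    subst heq
    exact pvB_base area lo hcap hno hhi
  | succ n ih =>
    intro lo hi hn hlh hcap hno hhi
    rw [pvBsearchB]
    by_cases hlt : lo < hi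
    · simp only [hlt, if_true]
      set mid := (lo + hi) / 2 with hmid
      have hm1 : lo ≤ mid := by omega
      have hm2 : mid < hi := by omega
      by_cases hbr : (mid : Int) * (mid : Int) > area
      · simp only [hbr, if_true]
        exact ih lo mid (by omega) (by omega) (by omega) hno (Or.inr hbr)
      · simp only [hbr, if_false]
        refine ih (mid + 1) hi (by omega) (by omega) hcap ?_ hhi
        intro j hj
        rcases Nat.lt_or_ge j lo with h | h
        · exact hno j h
        · push_neg at hbr
          have hjm : j ≤ mid := by omega
          calc (j : Int) * j ≤ (mid : Int) * mid := by
                have : (j : Int) ≤ mid := by exact_mod_cast hjm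
                have h0 : (0 : Int) ≤ j := by positivity
                nlinarith
            _ ≤ area := hbr
    · simp only [hlt, if_false]
      have heq : lo = hi := by omega
      subst heq
      exact pvB_base area lo hcap hno hhi

-- The per-city (last, this) pair is the same in both ports.
lemma perCity_eq (area : Int) :
    pvLoopA area 0 2500 (0, 0) =
      (if ((pvBsearchB area 2499 0 2499 : Nat) : Int) > 0
        then ((pvBsearchB area 2499 0 2499 : Nat) : Int) - 1 else 0,
       ((pvBsearchB area 2499 0 2499 : Nat) : Int)) := by
  have hA := pvLoopA_run area 2500 0 rfl (by intro j hj; omega)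
  have hB := pvBsearchB_run area 2499 0 2499 (by omega) (by omega) le_rfl
    (by intro j hj; omega) (Or.inl rfl)
  simp only [Nat.zero_sub, Nat.cast_zero] at hA
  rw [hA, hB]
  unfold pvL
  rcases Nat.eq_zero_or_pos (pvT area) with h | h
  · simp [h]
  · have h1 : ((pvT area : Nat) : Int) > 0 := by exact_mod_cast h
    simp only [h1, if_true]
    congr 1
    omega

-- ===== VERDICT (by name: the statement is the Claim_ definition above) =====
theorem get_nearest_squares_spec : Claim_equal_get_nearest_squares := by
  intro cities _
  unfold Spec_get_nearest_squares get_nearest_squares get_nearest_squares_alt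
  congr 1
  congr 1
  funext squares city
  simp only [perCity_eq city.2.2]
  by_cases h : (0 : Int) < ((pvBsearchB city.2.2 2499 0 2499 : Nat) : Int) <;>
    simp only [h, if_true, if_false, gt_iff_lt] <;> split_ifs <;> rfl
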